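-- pv_equiv track=rewrite | github.com/Presto-bit/aipodcast | backend/app.py | _replacement_head_valid
-- ===== SOURCE A (Python) =====
-- def _replacement_head_valid(lines, expected_first):
--     if len(lines) < 2 or len(lines) > 3:
--         return False
--     if expected_first:
--         sp0 = "Speaker1" if lines[0].startswith("Speaker1:") else "Speaker2"
--         if sp0 != expected_first:
--             return False
--     prev_sp = None
--     for ln in lines:
--         sp = "Speaker1" if ln.startswith("Speaker1:") else "Speaker2"
--         if prev_sp is not None and sp == prev_sp:
--             return False
--         prev_sp = sp
--     return True
-- ===== SOURCE B (Python) =====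
-- def _replacement_head_valid(lines, expected_first):
--     if not 2 <= len(lines) <= 3:
--         return False
--     first_is_1 = lines[0].startswith("Speaker1:")
--     if expected_first and expected_first != ("Speaker1" if first_is_1 else "Speaker2"):
--         return False
--     # binary labels alternate iff each position's label is the first label xor index parity
--     return all(ln.startswith("Speaker1:") == (first_is_1 ^ (i % 2 == 1))
--                for i, ln in enumerate(lines))
-- ===== Notes on version B (the rewrite author's own statement) =====
-- stated objective: alternative
-- what changed: B exploits that labels are binary: instead of A's stateful adjacent-comparison loop, it computes only the first line's classification bit and checks every line's bit against first_bit XOR index-parity (alternation of a binary sequence is equivalent to the parity pattern).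
import Mathlib
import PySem

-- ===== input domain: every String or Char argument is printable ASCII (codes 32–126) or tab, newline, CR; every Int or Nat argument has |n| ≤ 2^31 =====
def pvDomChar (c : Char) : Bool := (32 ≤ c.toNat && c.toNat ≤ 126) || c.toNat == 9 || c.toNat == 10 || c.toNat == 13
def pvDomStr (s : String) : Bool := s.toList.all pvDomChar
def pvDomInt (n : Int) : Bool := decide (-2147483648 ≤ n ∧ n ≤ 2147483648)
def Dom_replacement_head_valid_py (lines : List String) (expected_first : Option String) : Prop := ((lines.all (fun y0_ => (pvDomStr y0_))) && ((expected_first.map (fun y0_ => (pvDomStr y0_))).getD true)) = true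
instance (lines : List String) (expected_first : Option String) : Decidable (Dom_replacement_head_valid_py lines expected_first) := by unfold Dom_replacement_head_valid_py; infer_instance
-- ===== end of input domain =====

-- ===== PORT A =====
-- B replaces A's stateful adjacent-comparison loop by a parity check: each line's
-- classification bit must equal the first line's bit XOR its index parity ('alternative').
def pvSpeakerA (ln : String) : String :=
  if PySem.Str.startswith ln "Speaker1:" then "Speaker1" else "Speaker2"

-- A's for-loop with early return on equal adjacent speakers
def pvLoopA : List String → Option String → Bool
  | [], _ => true
  | ln :: rest, prev =>
    let sp := pvSpeakerA ln
    match prev with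
    | some p => if sp = p then false else pvLoopA rest (some sp)
    | none => pvLoopA rest (some sp)

def replacement_head_valid_py (lines : List String) (expected_first : Option String) : Bool :=
  if lines.length < 2 ∨ 3 < lines.length then false
  else
    -- 'if expected_first:' — Python truthiness: none and "" are falsy
    let ok := match expected_first with
      | none => true
      | some ef =>
        if ef = "" then true
        else
          let sp0 := pvSpeakerA ((PySem.List.pyGet? lines 0).getD "")  -- guarded: len ≥ 2
          decide (sp0 = ef)
    if ok then pvLoopA lines none else false

-- ===== PORT B =====
def replacement_head_valid_py_alt (lines : List String) (expected_first : Option String) : Bool :=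
  if ¬ (2 ≤ lines.length ∧ lines.length ≤ 3) then false
  else
    let first1 := PySem.Str.startswith ((PySem.List.pyGet? lines 0).getD "") "Speaker1:"
    -- 'if expected_first and expected_first != …:' (Python truthiness of expected_first)
    let bad := match expected_first with
      | none => false
      | some ef => if ef = "" then false else
          decide (ef ≠ (if first1 then "Speaker1" else "Speaker2"))
    if bad then false
    else (PySem.List.enumerate lines).all (fun p =>
      PySem.Str.startswith p.2 "Speaker1:" == (first1 ^^ (p.1 % 2 == 1)))

-- ===== PRECONDITION & SPEC =====
def Spec_replacement_head_valid_py (lines : List String) (expected_first : Option String) (out : Bool) : Prop := out = replacement_head_valid_py_alt lines expected_first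
instance (lines : List String) (expected_first : Option String) (out : Bool) : Decidable (Spec_replacement_head_valid_py lines expected_first out) := by unfold Spec_replacement_head_valid_py; infer_instance

-- ===== CLAIM =====
def Claim_equal_replacement_head_valid_py : Prop := ∀ (lines : List String) (expected_first : Option String), Dom_replacement_head_valid_py lines expected_first → Spec_replacement_head_valid_py lines expected_first (replacement_head_valid_py lines expected_first)

-- ===== LEMMAS AND PROOFS =====
lemma pv_core (lines : List String) (expected_first : Option String)
    (h2 : lines.length = 2 ∨ lines.length = 3) :
    replacement_head_valid_py lines expected_first
      = replacement_head_valid_py_alt lines expected_first := by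
  match lines, h2 with
  | [a, b], _ =>
    cases h1 : PySem.Chars.startswith a.toList ['S','p','e','a','k','e','r','1',':'] <;>
    cases hb : PySem.Chars.startswith b.toList ['S','p','e','a','k','e','r','1',':'] <;>
      · cases expected_first with
        | none =>
          simp [replacement_head_valid_py, replacement_head_valid_py_alt,
            pvLoopA, pvSpeakerA, PySem.List.pyGet?, PySem.List.pyIdx?,
            PySem.List.enumerate, h1, hb]
        | some ef =>
          by_cases he : ef = ""
          · simp [replacement_head_valid_py, replacement_head_valid_py_alt,
              pvLoopA, pvSpeakerA, PySem.List.pyGet?, PySem.List.pyIdx?,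
              PySem.List.enumerate, h1, hb, he]
          · by_cases he1 : ef = "Speaker1"
            · subst he1
              simp [replacement_head_valid_py, replacement_head_valid_py_alt,
                pvLoopA, pvSpeakerA, PySem.List.pyGet?, PySem.List.pyIdx?,
                PySem.List.enumerate, h1, hb]
            · by_cases he2 : ef = "Speaker2"
              · subst he2
                simp [replacement_head_valid_py, replacement_head_valid_py_alt,
                  pvLoopA, pvSpeakerA, PySem.List.pyGet?, PySem.List.pyIdx?,
                  PySem.List.enumerate, h1, hb]
              · have he1' : ¬ "Speaker1" = ef := fun h => he1 h.symm
                have he2' : ¬ "Speaker2" = ef := fun h => he2 h.symm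
                simp [replacement_head_valid_py, replacement_head_valid_py_alt,
                  pvLoopA, pvSpeakerA, PySem.List.pyGet?, PySem.List.pyIdx?,
                  PySem.List.enumerate, h1, hb, he, he1, he2, he1', he2']
  | [a, b, c], _ =>
    cases h1 : PySem.Chars.startswith a.toList ['S','p','e','a','k','e','r','1',':'] <;>
    cases hb : PySem.Chars.startswith b.toList ['S','p','e','a','k','e','r','1',':'] <;>
    cases hc : PySem.Chars.startswith c.toList ['S','p','e','a','k','e','r','1',':'] <;>
      · cases expected_first with
        | none =>
          simp [replacement_head_valid_py, replacement_head_valid_py_alt,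
            pvLoopA, pvSpeakerA, PySem.List.pyGet?, PySem.List.pyIdx?,
            PySem.List.enumerate, h1, hb, hc]
        | some ef =>
          by_cases he : ef = ""
          · simp [replacement_head_valid_py, replacement_head_valid_py_alt,
              pvLoopA, pvSpeakerA, PySem.List.pyGet?, PySem.List.pyIdx?,
              PySem.List.enumerate, h1, hb, hc, he]
          · by_cases he1 : ef = "Speaker1"
            · subst he1
              simp [replacement_head_valid_py, replacement_head_valid_py_alt,
                pvLoopA, pvSpeakerA, PySem.List.pyGet?, PySem.List.pyIdx?,
                PySem.List.enumerate, h1, hb, hc]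
            · by_cases he2 : ef = "Speaker2"
              · subst he2
                simp [replacement_head_valid_py, replacement_head_valid_py_alt,
                  pvLoopA, pvSpeakerA, PySem.List.pyGet?, PySem.List.pyIdx?,
                  PySem.List.enumerate, h1, hb, hc]
              · have he1' : ¬ "Speaker1" = ef := fun h => he1 h.symm
                have he2' : ¬ "Speaker2" = ef := fun h => he2 h.symm
                simp [replacement_head_valid_py, replacement_head_valid_py_alt,
                  pvLoopA, pvSpeakerA, PySem.List.pyGet?, PySem.List.pyIdx?,
                  PySem.List.enumerate, h1, hb, hc, he, he1, he2, he1', he2']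

-- ===== VERDICT =====
theorem replacement_head_valid_py_spec : Claim_equal_replacement_head_valid_py := by
  intro lines ef _
  unfold Spec_replacement_head_valid_py
  by_cases h : lines.length = 2 ∨ lines.length = 3
  · exact pv_core lines ef h
  · have h1 : lines.length < 2 ∨ 3 < lines.length := by omega
    rcases h1 with hl | hl
    · simp [replacement_head_valid_py, replacement_head_valid_py_alt, hl]
      try omega
    · simp [replacement_head_valid_py, replacement_head_valid_py_alt, hl]
      try omega
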